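-- pv_equiv track=rewrite | github.com/hiparkgss/CSES_Problem_practice | Two Knights.py | two_knights_problem
-- ===== SOURCE A (Python) =====
-- def two_knights_problem(k):
--     """
--     find the two knights problem for large k, at least bigger than 8
--     :param k:
--     :return:
--     """
--     answer = [0, 6, 28, 96, 252, 550, 1056, 1848]
--     n_ans = len(answer)
--
--     if k <= n_ans:  # large
--         return answer[k - 1]
--
--     size = k ** 2
--
--     # for the inner (k-4) by (k-4) areas, there are 9 unavailable spots
--     num_unavail_spots = [9]
--     multiplicity = [(k - 4) ** 2]
--
--     # 7 unavailable spots in depth 2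
--     num_unavail_spots.append(7)
--     multiplicity.append(4 * (k - 4))
--
--     # 5 unavailable spots in depth 1
--     num_unavail_spots.append(5)
--     multiplicity.append(4 * (k - 4))
--
--     # 4 corners of 2 by 2
--     num_unavail_spots.append(5)
--     multiplicity.append(4)
--
--     num_unavail_spots.append(4)
--     multiplicity.append(8)
--
--     num_unavail_spots.append(3)
--     multiplicity.append(4)
--
--     # calculate
--     result = 0
--
--     def f(unavail, mul, k_sq):
--         return mul * (k_sq - unavail) // 2
--
--     for i in range(len(num_unavail_spots)):
--         result += f(num_unavail_spots[i], multiplicity[i], size)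
--     return result
-- ===== SOURCE B (Python) =====
-- def two_knights_problem(k):
--     # Closed form (total pairs minus attacking pairs) replaces A's six-region
--     # accumulation loop for k > 8; the small-k table lookup is kept.
--     answer = [0, 6, 28, 96, 252, 550, 1056, 1848]
--     if k <= len(answer):
--         return answer[k - 1]
--     return k * k * (k * k - 1) // 2 - 4 * (k - 1) * (k - 2)
-- ===== Notes on version B (the rewrite author's own statement) =====
-- stated objective: simpler
-- what changed: For k > 8 the six-region weighted accumulation loop (parallel lists, helper f, range loop) is replaced by the closed-form count k*k*(k*k-1)//2 - 4*(k-1)*(k-2) (all pairs minus attacking pairs); the small-k table lookup branch is unchanged.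
import Mathlib
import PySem

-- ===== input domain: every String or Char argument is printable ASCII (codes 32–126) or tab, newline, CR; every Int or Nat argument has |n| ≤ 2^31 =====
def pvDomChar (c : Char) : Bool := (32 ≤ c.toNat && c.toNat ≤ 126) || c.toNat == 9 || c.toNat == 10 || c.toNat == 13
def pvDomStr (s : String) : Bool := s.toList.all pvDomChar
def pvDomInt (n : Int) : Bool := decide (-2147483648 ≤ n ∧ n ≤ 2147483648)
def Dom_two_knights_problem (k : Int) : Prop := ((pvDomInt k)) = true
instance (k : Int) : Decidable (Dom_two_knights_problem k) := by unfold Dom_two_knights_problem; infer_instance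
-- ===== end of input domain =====

-- B replaces A's six-region accumulation loop (for k > 8) by the closed-form
-- "all pairs minus attacking pairs" expression; the small-k table branch is unchanged (objective: simpler).

-- ===== PORT A =====
-- helper f(unavail, mul, k_sq) of A
def twoKnightsF (unavail mul k_sq : Int) : Int :=
  PySem.Int.floordiv (mul * (k_sq - unavail)) 2

def two_knights_problem (k : Int) : Int :=
  let answer : List Int := [0, 6, 28, 96, 252, 550, 1056, 1848]
  let n_ans : Int := (answer.length : Int)
  if k ≤ n_ans then
    (PySem.List.pyGet? answer (k - 1)).getD 0   -- answer[k-1]; none (IndexError) excluded by Pre_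
  else
    let size : Int := k ^ 2
    let num_unavail_spots : List Int := [9] ++ [7] ++ [5] ++ [5] ++ [4] ++ [3]
    let multiplicity : List Int :=
      [(k - 4) ^ 2] ++ [4 * (k - 4)] ++ [4 * (k - 4)] ++ [4] ++ [8] ++ [4]
    (PySem.List.pyRange 0 (num_unavail_spots.length : Int) 1).foldl
      (fun result i =>
        result + twoKnightsF (PySem.List.pyGetD num_unavail_spots i 0)
                             (PySem.List.pyGetD multiplicity i 0) size) 0

-- ===== PORT B =====
def two_knights_problem_alt (k : Int) : Int :=
  let answer : List Int := [0, 6, 28, 96, 252, 550, 1056, 1848]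
  if k ≤ (answer.length : Int) then
    (PySem.List.pyGet? answer (k - 1)).getD 0   -- answer[k-1]; none (IndexError) excluded by Pre_
  else
    PySem.Int.floordiv (k * k * (k * k - 1)) 2 - 4 * (k - 1) * (k - 2)

-- ===== PRECONDITION & SPEC =====
-- Pre_ excludes exactly k ≤ -8, where Python A raises IndexError on answer[k-1] (B raises there too).
def Pre_two_knights_problem (k : Int) : Prop := -7 ≤ k
instance (k : Int) : Decidable (Pre_two_knights_problem k) := by unfold Pre_two_knights_problem; infer_instance
def pvWitness_two_knights_problem : Int := 5

def Spec_two_knights_problem (k : Int) (out : Int) : Prop := out = two_knights_problem_alt k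
instance (k : Int) (out : Int) : Decidable (Spec_two_knights_problem k out) := by unfold Spec_two_knights_problem; infer_instance

-- ===== CLAIM (what is proved, stated in full; the proofs are below) =====
def Claim_equal_two_knights_problem : Prop := ∀ (k : Int), Dom_two_knights_problem k → Pre_two_knights_problem k → Spec_two_knights_problem k (two_knights_problem k)

-- ===== LEMMAS AND PROOFS =====

theorem fdiv_two_double (m : Int) : (2 * m) / 2 = m :=
  Int.mul_ediv_cancel_left m (by norm_num)

-- A's six-term sum equals B's closed form, as an identity over all integers k.
theorem sum_eq_closed (k : Int) :
    (k - 4) ^ 2 * (k ^ 2 - 9) / 2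
      + 4 * (k - 4) * (k ^ 2 - 7) / 2
      + 4 * (k - 4) * (k ^ 2 - 5) / 2
      + 4 * (k ^ 2 - 5) / 2
      + 8 * (k ^ 2 - 4) / 2
      + 4 * (k ^ 2 - 3) / 2
      = k * k * (k * k - 1) / 2 - 4 * (k - 1) * (k - 2) := by
  rcases Int.even_or_odd k with ⟨m, hm⟩ | ⟨m, hm⟩
  · subst hm
    have h1 : (m + m - 4) ^ 2 * ((m + m) ^ 2 - 9)
        = 2 * (2 * (m - 2) ^ 2 * (4 * m ^ 2 - 9)) := by ring
    have h2 : 4 * (m + m - 4) * ((m + m) ^ 2 - 7)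
        = 2 * (2 * (m + m - 4) * ((m + m) ^ 2 - 7)) := by ring
    have h3 : 4 * (m + m - 4) * ((m + m) ^ 2 - 5)
        = 2 * (2 * (m + m - 4) * ((m + m) ^ 2 - 5)) := by ring
    have h4 : 4 * ((m + m) ^ 2 - 5) = 2 * (2 * ((m + m) ^ 2 - 5)) := by ring
    have h5 : 8 * ((m + m) ^ 2 - 4) = 2 * (4 * ((m + m) ^ 2 - 4)) := by ring
    have h6 : 4 * ((m + m) ^ 2 - 3) = 2 * (2 * ((m + m) ^ 2 - 3)) := by ring
    have h7 : (m + m) * (m + m) * ((m + m) * (m + m) - 1)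
        = 2 * (2 * m * m * (4 * m * m - 1)) := by ring
    rw [h1, h2, h3, h4, h5, h6, h7, fdiv_two_double, fdiv_two_double,
        fdiv_two_double, fdiv_two_double, fdiv_two_double, fdiv_two_double,
        fdiv_two_double]
    ring
  · subst hm
    have h1 : (2 * m + 1 - 4) ^ 2 * ((2 * m + 1) ^ 2 - 9)
        = 2 * ((2 * m - 3) ^ 2 * (2 * m ^ 2 + 2 * m - 4)) := by ring
    have h2 : 4 * (2 * m + 1 - 4) * ((2 * m + 1) ^ 2 - 7)
        = 2 * (2 * (2 * m - 3) * ((2 * m + 1) ^ 2 - 7)) := by ring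
    have h3 : 4 * (2 * m + 1 - 4) * ((2 * m + 1) ^ 2 - 5)
        = 2 * (2 * (2 * m - 3) * ((2 * m + 1) ^ 2 - 5)) := by ring
    have h4 : 4 * ((2 * m + 1) ^ 2 - 5) = 2 * (2 * ((2 * m + 1) ^ 2 - 5)) := by ring
    have h5 : 8 * ((2 * m + 1) ^ 2 - 4) = 2 * (4 * ((2 * m + 1) ^ 2 - 4)) := by ring
    have h6 : 4 * ((2 * m + 1) ^ 2 - 3) = 2 * (2 * ((2 * m + 1) ^ 2 - 3)) := by ring
    have h7 : (2 * m + 1) * (2 * m + 1) * ((2 * m + 1) * (2 * m + 1) - 1)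
        = 2 * ((2 * m + 1) * (2 * m + 1) * (2 * m ^ 2 + 2 * m)) := by ring
    rw [h1, h2, h3, h4, h5, h6, h7, fdiv_two_double, fdiv_two_double,
        fdiv_two_double, fdiv_two_double, fdiv_two_double, fdiv_two_double,
        fdiv_two_double]
    ring

-- ===== VERDICT (by name: the statement is the Claim_ definition above) =====
theorem two_knights_problem_spec : Claim_equal_two_knights_problem := by
  intro k _hdom _hpre
  unfold Spec_two_knights_problem two_knights_problem two_knights_problem_alt
  simp only [List.length_cons, List.length_nil]
  by_cases hk : k ≤ ((8 : Nat) : Int)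
  · rw [if_pos hk, if_pos hk]
  · rw [if_neg hk, if_neg hk]
    simp only [List.cons_append, List.nil_append, List.length_cons, List.length_nil]
    rw [show PySem.List.pyRange 0 ((6 : Nat) : Int) 1 = [0, 1, 2, 3, 4, 5] from by decide]
    simp [List.foldl, twoKnightsF, PySem.List.pyGetD, PySem.List.pyGet?, PySem.List.pyIdx?]
    linarith [sum_eq_closed k]
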